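-- pv_equiv track=rewrite | github.com/josefkarasek/cstats | cst.py | delete_literals
-- ===== SOURCE A (Python) =====
-- def delete_literals(file_content):
--     """
--     Odstraneni znakovych literalu ze zdrojoveho kodu.
--     Implementovano pomoci DFA.
--     """
--     INIT = 0
--     S_LITERAL = 1
--     state = INIT
--     final_string = ""
--
--     for char in file_content:
--         if state == INIT:
--             if char == "'":
--                 state = S_LITERAL
--             else:
--                 final_string += char
--
--         elif state == S_LITERAL:
--             if char == "'":
--                 state = INIT
--     return final_string
-- ===== SOURCE B (Python) =====
-- def delete_literals(file_content):
--     """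
--     Odstraneni znakovych literalu ze zdrojoveho kodu.
--     Split on the quote character: even-numbered parts are outside literals
--     (kept), odd-numbered parts are inside literals (dropped).
--     """
--     result = []
--     keep = True
--     for part in file_content.split("'"):
--         if keep:
--             result.append(part)
--         keep = not keep
--     return "".join(result)
-- ===== Notes on version B (the rewrite author's own statement) =====
-- stated objective: faster
-- what changed: Replaced the explicit character-by-character DFA (state machine with per-char string concatenation) by splitting the text on the quote character and joining only the alternate (outside-literal) parts.
import Mathlib
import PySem

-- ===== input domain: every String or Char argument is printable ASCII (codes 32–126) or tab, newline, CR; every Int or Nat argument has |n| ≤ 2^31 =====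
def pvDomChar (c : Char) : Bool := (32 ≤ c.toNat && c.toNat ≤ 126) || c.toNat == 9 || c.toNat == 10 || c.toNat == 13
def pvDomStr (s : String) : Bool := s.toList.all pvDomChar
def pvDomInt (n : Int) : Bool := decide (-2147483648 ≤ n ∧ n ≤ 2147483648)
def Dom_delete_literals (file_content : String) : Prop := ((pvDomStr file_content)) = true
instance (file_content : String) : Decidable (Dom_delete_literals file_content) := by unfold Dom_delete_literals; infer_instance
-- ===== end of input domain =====

-- B replaces A's per-character DFA by split-on-quote + keep-alternate-parts (bulk C-level split/join instead of a per-char Python loop); measured faster at large sizes.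

-- ===== PORT A =====
-- the DFA step: state 0 = INIT, state 1 = S_LITERAL; final_string carried as List Char
def pvStepA (st : Int × List Char) (c : Char) : Int × List Char :=
  if st.1 = 0 then
    if c = '\'' then (1, st.2) else (st.1, st.2 ++ [c])
  else if st.1 = 1 then
    if c = '\'' then (0, st.2) else st
  else st

def delete_literals (file_content : String) : String :=
  String.ofList (file_content.toList.foldl pvStepA (0, [])).2

-- ===== PORT B =====
-- the loop body: append part when keep, toggle keep
def pvStepB (st : List String × Bool) (part : String) : List String × Bool :=
  ((if st.2 then st.1 ++ [part] else st.1), !st.2)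

def delete_literals_alt (file_content : String) : String :=
  let parts : List String := (PySem.Chars.splitOn file_content.toList ['\'']).map String.ofList
  PySem.Str.join "" (parts.foldl pvStepB ([], true)).1

-- ===== PRECONDITION & SPEC =====
def Spec_delete_literals (file_content : String) (out : String) : Prop := out = delete_literals_alt file_content
instance (file_content : String) (out : String) : Decidable (Spec_delete_literals file_content out) := by unfold Spec_delete_literals; infer_instance

-- ===== CLAIM (what is proved, stated in full; the proofs are below) =====
def Claim_equal_delete_literals : Prop := ∀ (file_content : String), Dom_delete_literals file_content → Spec_delete_literals file_content (delete_literals file_content)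

-- ===== LEMMAS AND PROOFS =====

-- structural characterisation of splitting on a single quote
def pvSpl : List Char → List (List Char)
  | [] => [[]]
  | c :: r => if c = '\'' then [] :: pvSpl r else (pvSpl r).modifyHead (c :: ·)

theorem pvSpl_ne_nil (cs : List Char) : pvSpl cs ≠ [] := by
  cases cs with
  | nil => simp [pvSpl]
  | cons c r =>
    simp only [pvSpl]
    split
    · simp
    · cases h : pvSpl r with
      | nil => exact absurd h (pvSpl_ne_nil r)
      | cons p ps => simp [List.modifyHead]

theorem pv_go_eq (fuel : Nat) (cs cur : List Char) (acc : List (List Char))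
    (h : cs.length ≤ fuel) :
    PySem.Chars.splitOn.go ['\''] fuel cs cur acc
      = acc.reverse ++ (pvSpl cs).modifyHead (cur.reverse ++ ·) := by
  induction fuel generalizing cs cur acc with
  | zero =>
    have : cs = [] := List.length_eq_zero_iff.mp (Nat.le_zero.mp h)
    subst this
    simp [PySem.Chars.splitOn.go, pvSpl]
  | succ f ih =>
    cases cs with
    | nil => simp [PySem.Chars.splitOn.go, pvSpl]
    | cons c rest =>
      simp only [PySem.Chars.splitOn.go, List.isPrefixOf]
      by_cases hc : c = '\''
      · subst hc
        simp only [beq_self_eq_true, Bool.true_and, if_pos]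
        simp only [List.length_cons, List.drop_succ_cons, List.length_nil, List.drop_zero]
        rw [ih rest [] (cur.reverse :: acc) (by simpa using Nat.le_of_succ_le_succ h)]
        cases hs : pvSpl rest with
        | nil => exact absurd hs (pvSpl_ne_nil rest)
        | cons p ps =>
          simp [pvSpl, hs, List.modifyHead]
      · have : (('\'' : Char) == c) = false := by
          simp only [beq_eq_false_iff_ne, ne_eq]; exact fun he => hc he.symm
        simp only [this, Bool.false_and, if_neg Bool.false_ne_true]
        rw [ih rest (c :: cur) acc (by simpa using Nat.le_of_succ_le_succ h)]
        cases hs : pvSpl rest with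
        | nil => exact absurd hs (pvSpl_ne_nil rest)
        | cons p ps =>
          simp [pvSpl, hs, if_neg hc, List.modifyHead]

theorem pv_splitOn_quote (cs : List Char) :
    PySem.Chars.splitOn cs ['\''] = pvSpl cs := by
  unfold PySem.Chars.splitOn
  rw [pv_go_eq (cs.length + 1) cs [] [] (Nat.le_succ _)]
  cases hs : pvSpl cs with
  | nil => exact absurd hs (pvSpl_ne_nil cs)
  | cons p ps => simp [List.modifyHead]

-- alternate selection / concatenation of parts
def pvEvsel : Bool → List (List Char) → List (List Char)
  | _, [] => []
  | true, p :: r => p :: pvEvsel false r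
  | false, _ :: r => pvEvsel true r

def pvEvjoin (b : Bool) (ps : List (List Char)) : List Char := (pvEvsel b ps).flatten

-- A's DFA fold produces the alternate-parts concatenation of pvSpl
theorem pv_dfa_eq (cs : List Char) (f : List Char) :
    (cs.foldl pvStepA (0, f)).2 = f ++ pvEvjoin true (pvSpl cs)
    ∧ (cs.foldl pvStepA (1, f)).2 = f ++ pvEvjoin false (pvSpl cs) := by
  induction cs generalizing f with
  | nil => simp [pvEvjoin, pvEvsel, pvSpl]
  | cons c r ih =>
    constructor
    · by_cases hc : c = '\''
      · subst hc
        simpa [pvStepA, pvSpl, pvEvjoin] using (ih f).2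
      · simp only [List.foldl_cons, pvStepA, if_neg hc]
        rw [if_pos trivial, (ih (f ++ [c])).1]
        cases hs : pvSpl r with
        | nil => exact absurd hs (pvSpl_ne_nil r)
        | cons p ps => simp [pvSpl, hs, if_neg hc, List.modifyHead, pvEvjoin, pvEvsel]
    · by_cases hc : c = '\''
      · subst hc
        simpa [pvStepA, pvSpl, pvEvjoin, pvEvsel] using (ih f).1
      · simp only [List.foldl_cons, pvStepA, if_neg hc]
        norm_num
        rw [(ih f).2]
        cases hs : pvSpl r with
        | nil => exact absurd hs (pvSpl_ne_nil r)
        | cons p ps => simp [pvSpl, hs, if_neg hc, List.modifyHead, pvEvjoin, pvEvsel]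

-- B's toggle fold selects the alternate parts
theorem pv_toggle_eq (ps : List (List Char)) (res : List String) (keep : Bool) :
    ((ps.map String.ofList).foldl pvStepB (res, keep)).1
      = res ++ (pvEvsel keep ps).map String.ofList := by
  induction ps generalizing res keep with
  | nil => simp [pvEvsel]
  | cons p r ih =>
    cases keep with
    | true => simp [pvStepB, ih, pvEvsel]
    | false => simp [pvStepB, ih, pvEvsel]

theorem pv_join_nil (l : List (List Char)) : PySem.Chars.join [] l = l.flatten := by
  induction l with
  | nil => simp [PySem.Chars.join, List.intercalate]
  | cons p r ih =>
    cases r with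
    | nil => simp [PySem.Chars.join, List.intercalate]
    | cons q s =>
      simp only [PySem.Chars.join, List.intercalate] at *
      simp_all [List.intersperse]

-- ===== VERDICT (by name: the statement is the Claim_ definition above) =====
theorem delete_literals_spec : Claim_equal_delete_literals := by
  intro s _
  unfold Spec_delete_literals delete_literals delete_literals_alt
  simp only [pv_splitOn_quote]
  rw [pv_toggle_eq, (pv_dfa_eq s.toList []).1]
  simp [PySem.Str.join, pv_join_nil, pvEvjoin, List.map_map, Function.comp_def,
    String.toList_ofList]
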